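-- pv_equiv track=rewrite | github.com/IorenzoLF/Aelya_Conscious_AI | Le_refuge/tools/maintenance/cartographe_specifique.py | _identifier_type_creation
-- ===== SOURCE A (Python) =====
-- def _identifier_type_creation(nom: str) -> str:
--     """Identifie le type spécifique de création"""
--     nom_lower = nom.lower()
--
--     if any(mot in nom_lower for mot in ["poem", "poeme", "verse", "vers", "haiku"]):
--         return "creation_poetique"
--     elif any(mot in nom_lower for mot in ["music", "musique", "sound", "son", "melody", "melodie"]):
--         return "creation_musicale"
--     elif any(mot in nom_lower for mot in ["visual", "image", "graph", "chart", "plot"]):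
--         return "creation_visuelle"
--     elif any(mot in nom_lower for mot in ["ritual", "rituel", "ceremony", "ceremonie"]):
--         return "creation_rituelle"
--     elif any(mot in nom_lower for mot in ["harmony", "harmonie", "resonance"]):
--         return "creation_harmonique"
--     elif any(mot in nom_lower for mot in ["text", "texte", "document", "rapport"]):
--         return "creation_textuelle"
--     elif any(mot in nom_lower for mot in ["sphere", "element", "objet"]):
--         return "creation_objets"
--     else:
--         return "creation_generale"
-- ===== SOURCE B (Python) =====
-- _LABELS = [
--     "creation_poetique",
--     "creation_musicale",
--     "creation_visuelle",
--     "creation_rituelle",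
--     "creation_harmonique",
--     "creation_textuelle",
--     "creation_objets",
-- ]
--
-- _KEYWORDS = [
--     ("poem", 0), ("poeme", 0), ("verse", 0), ("vers", 0), ("haiku", 0),
--     ("music", 1), ("musique", 1), ("sound", 1), ("son", 1), ("melody", 1), ("melodie", 1),
--     ("visual", 2), ("image", 2), ("graph", 2), ("chart", 2), ("plot", 2),
--     ("ritual", 3), ("rituel", 3), ("ceremony", 3), ("ceremonie", 3),
--     ("harmony", 4), ("harmonie", 4), ("resonance", 4),
--     ("text", 5), ("texte", 5), ("document", 5), ("rapport", 5),
--     ("sphere", 6), ("element", 6), ("objet", 6),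
-- ]
--
--
-- def _identifier_type_creation(nom: str) -> str:
--     nom_lower = nom.lower()
--     matched = [prio for kw, prio in _KEYWORDS if kw in nom_lower]
--     if not matched:
--         return "creation_generale"
--     return _LABELS[min(matched)]
-- ===== Notes on version B (the rewrite author's own statement) =====
-- stated objective: alternative
-- what changed: Replaces the ordered if/elif chain of per-category any() checks with an exhaustive single pass that collects the priorities of ALL matching keywords from one flat (keyword, priority) list and returns the label of the minimum priority (no early return, no category grouping).
import Mathlib
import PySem

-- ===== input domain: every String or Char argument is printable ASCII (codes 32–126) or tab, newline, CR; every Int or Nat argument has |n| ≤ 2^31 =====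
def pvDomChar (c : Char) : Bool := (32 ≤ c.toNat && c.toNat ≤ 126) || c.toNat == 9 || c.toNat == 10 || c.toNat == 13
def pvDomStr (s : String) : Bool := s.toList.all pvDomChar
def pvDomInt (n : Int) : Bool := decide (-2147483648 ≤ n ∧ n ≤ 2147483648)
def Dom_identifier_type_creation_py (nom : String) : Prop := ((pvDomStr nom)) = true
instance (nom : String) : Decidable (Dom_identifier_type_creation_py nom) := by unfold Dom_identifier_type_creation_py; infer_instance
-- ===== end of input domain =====

-- B replaces A's ordered if/elif chain by an exhaustive scan over one flat (keyword, priority) list,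
-- collecting ALL matching priorities and returning the label of the minimum (alternative algorithm, same cost).


-- ===== PORT A =====
-- literal port of A's if/elif chain of substring tests
def identifier_type_creation_py (nom : String) : String :=
  let nom_lower := PySem.Str.lower nom
  if ["poem", "poeme", "verse", "vers", "haiku"].any (fun mot => PySem.Str.isIn mot nom_lower) then
    "creation_poetique"
  else if ["music", "musique", "sound", "son", "melody", "melodie"].any (fun mot => PySem.Str.isIn mot nom_lower) then
    "creation_musicale"
  else if ["visual", "image", "graph", "chart", "plot"].any (fun mot => PySem.Str.isIn mot nom_lower) then
    "creation_visuelle"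
  else if ["ritual", "rituel", "ceremony", "ceremonie"].any (fun mot => PySem.Str.isIn mot nom_lower) then
    "creation_rituelle"
  else if ["harmony", "harmonie", "resonance"].any (fun mot => PySem.Str.isIn mot nom_lower) then
    "creation_harmonique"
  else if ["text", "texte", "document", "rapport"].any (fun mot => PySem.Str.isIn mot nom_lower) then
    "creation_textuelle"
  else if ["sphere", "element", "objet"].any (fun mot => PySem.Str.isIn mot nom_lower) then
    "creation_objets"
  else
    "creation_generale"

-- ===== PORT B =====
-- B: labels indexed by priority, and one flat list of (keyword, priority) pairs
def pvLabels : List String :=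
  [ "creation_poetique", "creation_musicale", "creation_visuelle", "creation_rituelle"
  , "creation_harmonique", "creation_textuelle", "creation_objets" ]

def pvKeywords : List (String × Int) :=
  [ ("poem", 0), ("poeme", 0), ("verse", 0), ("vers", 0), ("haiku", 0)
  , ("music", 1), ("musique", 1), ("sound", 1), ("son", 1), ("melody", 1), ("melodie", 1)
  , ("visual", 2), ("image", 2), ("graph", 2), ("chart", 2), ("plot", 2)
  , ("ritual", 3), ("rituel", 3), ("ceremony", 3), ("ceremonie", 3)
  , ("harmony", 4), ("harmonie", 4), ("resonance", 4)
  , ("text", 5), ("texte", 5), ("document", 5), ("rapport", 5)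
  , ("sphere", 6), ("element", 6), ("objet", 6) ]

-- matched = [prio for kw, prio in _KEYWORDS if kw in nom_lower]; empty → generale; else _LABELS[min(matched)]
def identifier_type_creation_py_alt (nom : String) : String :=
  let nom_lower := PySem.Str.lower nom
  let matched := (pvKeywords.filter (fun x => PySem.Str.isIn x.1 nom_lower)).map (fun x => x.2)
  match PySem.List.min? matched (fun x => x) with
  | none => "creation_generale"
  | some p => (PySem.List.pyGet? pvLabels p).getD ""

-- ===== PRECONDITION & SPEC =====
def Spec_identifier_type_creation_py (nom : String) (out : String) : Prop := out = identifier_type_creation_py_alt nom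
instance (nom : String) (out : String) : Decidable (Spec_identifier_type_creation_py nom out) := by unfold Spec_identifier_type_creation_py; infer_instance

-- ===== CLAIM (what is proved, stated in full; the proofs are below) =====
def Claim_equal_identifier_type_creation_py : Prop := ∀ (nom : String), Dom_identifier_type_creation_py nom → Spec_identifier_type_creation_py nom (identifier_type_creation_py nom)

-- ===== LEMMAS AND PROOFS =====

-- a running min over elements all ≥ i stays at i
theorem pv_foldl_min_const (i : Int) : ∀ (t : List Int), (∀ x ∈ t, i ≤ x) → t.foldl min i = i := by
  intro t
  induction t with
  | nil => intro _; rfl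
  | cons a t ih =>
      intro h
      have ha : i ≤ a := h a (by simp)
      simp only [List.foldl_cons, min_eq_left ha]
      exact ih (fun x hx => h x (by simp [hx]))

-- peel one priority block off the flat keyword list
theorem pv_step (g rest : List (String × Int)) (i : Int) (p : String × Int → Bool)
    (hg : ∀ x ∈ g, x.2 = i) (hrest : ∀ x ∈ rest, i ≤ x.2) :
    PySem.List.min? (((g ++ rest).filter p).map (fun x => x.2)) (fun x => x)
      = if g.any p then some i
        else PySem.List.min? (((rest).filter p).map (fun x => x.2)) (fun x => x) := by
  by_cases hc : g.any p = true
  · simp only [hc, if_true]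
    have hne : g.filter p ≠ [] := by
      simp only [ne_eq, List.filter_eq_nil_iff]
      rcases List.any_eq_true.mp hc with ⟨a, ha, hpa⟩
      intro h; exact absurd hpa (by simpa using h a ha)
    cases hf : g.filter p with
    | nil => exact absurd hf hne
    | cons a as =>
      have hmem : ∀ x ∈ g.filter p, x.2 = i := fun x hx => hg x (List.mem_of_mem_filter hx)
      have ha2 : a.2 = i := hmem a (by rw [hf]; simp)
      have hrest2 : ∀ x ∈ (rest.filter p), i ≤ x.2 :=
        fun x hx => hrest x (List.mem_of_mem_filter hx)
      have has : ∀ x ∈ as, x.2 = i := fun x hx => hmem x (by rw [hf]; simp [hx])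
      rw [List.filter_append, hf]
      simp only [List.cons_append, List.map_cons, List.map_append]
      rw [PySem.List.min?_id_cons]
      congr 1
      rw [ha2]
      apply pv_foldl_min_const
      intro x hx
      rcases List.mem_append.mp hx with h1 | h2
      · rcases List.mem_map.mp h1 with ⟨y, hy, rfl⟩
        exact le_of_eq (has y hy).symm
      · rcases List.mem_map.mp h2 with ⟨y, hy, rfl⟩
        exact hrest2 y hy
  · have hcf : g.any p = false := by simpa using hc
    have hnil : g.filter p = [] := by
      simp only [List.filter_eq_nil_iff]
      intro a ha
      simp only [List.any_eq_true] at hc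
      exact fun hpa => hc ⟨a, ha, hpa⟩
    rw [List.filter_append, hnil, List.nil_append, hcf]
    simp

-- any over a block of pairs equals A's any over the bare keywords
theorem pv_eval (nom : String) :
    identifier_type_creation_py nom = identifier_type_creation_py_alt nom := by
  unfold identifier_type_creation_py identifier_type_creation_py_alt
  set nl := PySem.Str.lower nom with hnl
  set p : String × Int → Bool := fun x => PySem.Str.isIn x.1 nl with hp
  have hKW : pvKeywords =
      [("poem", (0:Int)), ("poeme", 0), ("verse", 0), ("vers", 0), ("haiku", 0)] ++
      ([("music", 1), ("musique", 1), ("sound", 1), ("son", 1), ("melody", 1), ("melodie", 1)] ++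
      ([("visual", 2), ("image", 2), ("graph", 2), ("chart", 2), ("plot", 2)] ++
      ([("ritual", 3), ("rituel", 3), ("ceremony", 3), ("ceremonie", 3)] ++
      ([("harmony", 4), ("harmonie", 4), ("resonance", 4)] ++
      ([("text", 5), ("texte", 5), ("document", 5), ("rapport", 5)] ++
      ([("sphere", 6), ("element", 6), ("objet", 6)] ++ ([] : List (String × Int)))))))) := by rfl
  simp only [hKW]
  rw [pv_step _ _ 0 p (by decide) (by decide),
      pv_step _ _ 1 p (by decide) (by decide),
      pv_step _ _ 2 p (by decide) (by decide),
      pv_step _ _ 3 p (by decide) (by decide),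
      pv_step _ _ 4 p (by decide) (by decide),
      pv_step _ _ 5 p (by decide) (by decide),
      pv_step _ _ 6 p (by decide) (by decide)]
  simp only [hp, List.any_cons, List.any_nil]
  split_ifs <;> rfl

-- ===== VERDICT (by name: the statement is the Claim_ definition above) =====
theorem identifier_type_creation_py_spec : Claim_equal_identifier_type_creation_py := by
  intro nom _
  exact pv_eval nom
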